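-- pv_equiv track=rewrite | github.com/erickmjr/revisaoPython | removerDuplicatas.py | removeDuplicatas
-- ===== SOURCE A (Python) =====
-- def possuiValor(lista, item):
--     for i in range(len(lista)):
--         if (lista[i] == item):
--             return True
--     return False
--
-- def removeDuplicatas(lista: list[int]):
--     listaSemDuplicatas = []
--
--     for i in range(len(lista)):
--         duplicado = False
--
--         for j in range(len(lista)):
--             if ( (lista[i] == lista[j]) and i != j ):
--                 duplicado = True
--                 break
--
--         if (duplicado and not possuiValor(listaSemDuplicatas, lista[i])):
--             listaSemDuplicatas.append(lista[i])
--
--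
--     return listaSemDuplicatas
-- ===== SOURCE B (Python) =====
-- def removeDuplicatas(lista: list[int]):
--     # Sort a copy; equal values become adjacent, so one neighbor scan finds
--     # every value occurring at least twice. Then one pass over the original
--     # list emits each such value at its first appearance.
--     s = sorted(lista)
--     dups = set()
--     for prev, cur in zip(s, s[1:]):
--         if prev == cur:
--             dups.add(cur)
--     res = []
--     emitted = set()
--     for x in lista:
--         if x in dups and x not in emitted:
--             emitted.add(x)
--             res.append(x)
--     return res
-- ===== Notes on version B (the rewrite author's own statement) =====
-- stated objective: faster
-- what changed: Replaced the O(n^2) nested index scan (plus a linear membership scan of the output) by sort-then-adjacent-scan to find values with count>=2, followed by one pass over the original list with hash sets, preserving first-appearance order.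
import Mathlib
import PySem

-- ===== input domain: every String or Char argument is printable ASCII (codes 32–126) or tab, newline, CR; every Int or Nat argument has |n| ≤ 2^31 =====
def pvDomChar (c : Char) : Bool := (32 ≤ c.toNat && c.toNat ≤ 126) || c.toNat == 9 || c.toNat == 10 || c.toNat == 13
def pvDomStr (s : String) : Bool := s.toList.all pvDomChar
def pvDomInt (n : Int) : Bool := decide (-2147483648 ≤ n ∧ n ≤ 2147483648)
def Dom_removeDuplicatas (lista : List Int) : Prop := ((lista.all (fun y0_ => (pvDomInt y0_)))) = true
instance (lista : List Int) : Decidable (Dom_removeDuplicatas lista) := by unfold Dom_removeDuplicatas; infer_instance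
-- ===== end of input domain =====

-- B replaces A's nested index scan by sort + adjacent-equal scan + one ordered
-- emission pass (objective: faster); return values proved equal on Dom.

-- ===== PORT A =====
def possuiValor (lista : List Int) (item : Int) : Bool :=
  (PySem.List.pyRange 0 lista.length 1).foldl
    (fun ret i => if PySem.List.pyGetD lista i 0 == item then true else ret) false

def removeDuplicatas (lista : List Int) : List Int :=
  (PySem.List.pyRange 0 lista.length 1).foldl
    (fun acc i =>
      let duplicado := (PySem.List.pyRange 0 lista.length 1).foldl
        (fun d j =>
          if (PySem.List.pyGetD lista i 0 == PySem.List.pyGetD lista j 0) && (i != j)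
          then true else d) false
      if duplicado && !(possuiValor acc (PySem.List.pyGetD lista i 0)) then
        acc ++ [PySem.List.pyGetD lista i 0]
      else acc) []

-- ===== PORT B =====
def removeDuplicatas_alt (lista : List Int) : List Int :=
  let s := PySem.List.sorted lista (fun x => x) false
  let dups : PySem.Set Int := (s.zip s.tail).foldl
    (fun d p => if p.1 == p.2 then PySem.Set.add d p.2 else d) PySem.Set.empty
  (lista.foldl
    (fun (acc : List Int × PySem.Set Int) x =>
      if PySem.Set.contains dups x && !(PySem.Set.contains acc.2 x)
      then (acc.1 ++ [x], PySem.Set.add acc.2 x) else acc)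
    ([], PySem.Set.empty)).1

-- ===== PRECONDITION & SPEC =====
def Spec_removeDuplicatas (lista : List Int) (out : List Int) : Prop := out = removeDuplicatas_alt lista
instance (lista : List Int) (out : List Int) : Decidable (Spec_removeDuplicatas lista out) := by unfold Spec_removeDuplicatas; infer_instance

-- ===== CLAIM (what is proved, stated in full; the proofs are below) =====
def Claim_equal_removeDuplicatas : Prop := ∀ (lista : List Int), Dom_removeDuplicatas lista → Spec_removeDuplicatas lista (removeDuplicatas lista)

-- ===== LEMMAS AND PROOFS =====

-- possuiValor is a membership test of its list argument
theorem possuiValor_eq_any (lista : List Int) (item : Int) :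
    possuiValor lista item = lista.any (fun y => y == item) := by
  unfold possuiValor
  rw [PySem.List.foldl_pyRange_zero_pyGetD' lista 0
      (fun ret y => if y == item then true else ret) false]
  rw [PySem.List.foldl_if_true_eq (fun y => y == item) lista false]
  simp

-- a list with two distinct members satisfying p has 2 ≤ countP; conversely with Nodup
theorem nodup_two_le_countP_iff (R : List Int) (hR : R.Nodup) (p : Int → Bool)
    (i : Int) (hi : i ∈ R) (hpi : p i = true) :
    2 ≤ R.countP p ↔ ∃ j ∈ R, p j = true ∧ j ≠ i := by
  rw [List.countP_eq_length_filter]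
  have hif : i ∈ R.filter p := List.mem_filter.mpr ⟨hi, hpi⟩
  have hnd : (R.filter p).Nodup := hR.filter p
  constructor
  · intro hlen
    by_contra h
    push Not at h
    have hall : ∀ j ∈ R.filter p, j = i := fun j hj =>
      h j (List.mem_filter.mp hj).1 (List.mem_filter.mp hj).2
    cases hF : R.filter p with
    | nil => rw [hF] at hif; simp at hif
    | cons a t =>
      cases t with
      | nil => rw [hF] at hlen; simp at hlen
      | cons b t2 =>
        rw [hF] at hall hnd
        have ha := hall a (by simp)
        have hb := hall b (by simp)
        rcases List.nodup_cons.mp hnd with ⟨hna, _⟩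
        exact hna (by rw [ha, hb]; simp)
  · rintro ⟨j, hjR, hjp, hji⟩
    have hjf : j ∈ R.filter p := List.mem_filter.mpr ⟨hjR, hjp⟩
    cases hF : R.filter p with
    | nil => rw [hF] at hif; simp at hif
    | cons a t =>
      cases t with
      | nil =>
        rw [hF] at hif hjf
        simp at hif hjf
        exact absurd (hjf.trans hif.symm) hji
      | cons b t2 => simp
  
-- count of a value as countP over the index range
theorem count_eq_countP_range (l : List Int) (x : Int) :
    l.count x = (PySem.List.pyRange 0 l.length 1).countP
      (fun j => PySem.List.pyGetD l j 0 == x) := by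
  conv_lhs => rw [← PySem.List.map_pyGetD_pyRange_zero' l 0]
  rw [List.count, List.countP_map]
  rfl

-- A's inner loop computes "this value occurs at least twice"
theorem duplicado_iff (l : List Int) (i : Int) (h0 : 0 ≤ i) (h1 : i < (l.length : Int)) :
    ((PySem.List.pyRange 0 l.length 1).foldl
      (fun d j =>
        if (PySem.List.pyGetD l i 0 == PySem.List.pyGetD l j 0) && (i != j)
        then true else d) false) = true ↔
    2 ≤ l.count (PySem.List.pyGetD l i 0) := by
  rw [PySem.List.foldl_if_true_eq
      (fun j => (PySem.List.pyGetD l i 0 == PySem.List.pyGetD l j 0) && (i != j))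
      (PySem.List.pyRange 0 l.length 1) false]
  rw [count_eq_countP_range]
  have hi : i ∈ PySem.List.pyRange 0 l.length 1 := by
    rw [PySem.List.mem_pyRange_one]; exact ⟨h0, h1⟩
  rw [nodup_two_le_countP_iff _ (PySem.List.nodup_pyRange_one 0 l.length)
      (fun j => PySem.List.pyGetD l j 0 == PySem.List.pyGetD l i 0) i hi (by simp)]
  simp only [Bool.false_or, List.any_eq_true, Bool.and_eq_true, beq_iff_eq, bne_iff_ne]
  constructor
  · rintro ⟨j, hj, heq, hne⟩
    exact ⟨j, hj, heq.symm, fun h => hne h.symm⟩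
  · rintro ⟨j, hj, heq, hne⟩
    exact ⟨j, hj, heq.symm, fun h => hne h.symm⟩

-- membership in B's dups accumulator
theorem mem_dups_foldl (zs : List (Int × Int)) (d0 : PySem.Set Int) (x : Int) :
    x ∈ zs.foldl (fun d p => if p.1 == p.2 then PySem.Set.add d p.2 else d) d0 ↔
    x ∈ d0 ∨ ∃ p ∈ zs, p.1 = p.2 ∧ p.2 = x := by
  induction zs generalizing d0 with
  | nil => simp
  | cons p t ih =>
    simp only [List.foldl_cons]
    by_cases hp : p.1 = p.2
    · rw [if_pos (by simpa using hp), ih, PySem.Set.mem_add]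
      constructor
      · rintro (⟨h | h⟩ | h)
        · exact Or.inl h
        · exact Or.inr ⟨p, by simp, hp, h.symm⟩
        · rcases h with ⟨q, hq, h1, h2⟩; exact Or.inr ⟨q, by simp [hq], h1, h2⟩
      · rintro (h | ⟨q, hq, h1, h2⟩)
        · exact Or.inl (Or.inl h)
        · rcases List.mem_cons.mp hq with rfl | hq
          · exact Or.inl (Or.inr h2.symm)
          · exact Or.inr ⟨q, hq, h1, h2⟩
    · rw [if_neg (by simpa using hp), ih]
      constructor
      · rintro (h | ⟨q, hq, h1, h2⟩)
        · exact Or.inl h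
        · exact Or.inr ⟨q, by simp [hq], h1, h2⟩
      · rintro (h | ⟨q, hq, h1, h2⟩)
        · exact Or.inl h
        · rcases List.mem_cons.mp hq with rfl | hq
          · exact absurd h1 hp
          · exact Or.inr ⟨q, hq, h1, h2⟩

-- in a (≤)-sorted list, "some adjacent pair is x,x" ↔ "x occurs at least twice"
theorem adj_pair_iff_two_le_count (s : List Int) (hs : s.Pairwise (· ≤ ·)) (x : Int) :
    (∃ p ∈ s.zip s.tail, p.1 = p.2 ∧ p.2 = x) ↔ 2 ≤ s.count x := by
  induction s with
  | nil => simp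
  | cons a t ih =>
    cases t with
    | nil =>
      simp only [List.tail_cons, List.zip_nil_right]
      constructor
      · rintro ⟨p, hp, -⟩; simp at hp
      · intro hc
        rw [List.count_cons] at hc
        simp at hc
        split at hc <;> omega
    | cons b u =>
      have hab : a ≤ b := (List.pairwise_cons.mp hs).1 b (by simp)
      have hs' : (b :: u).Pairwise (· ≤ ·) := (List.pairwise_cons.mp hs).2
      have hbu : ∀ y ∈ u, b ≤ y := (List.pairwise_cons.mp hs').1
      simp only [List.tail_cons, List.zip_cons_cons]
      constructor
      · rintro ⟨p, hp, h1, h2⟩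
        rcases List.mem_cons.mp hp with rfl | hp
        · simp only at h1 h2
          rw [List.count_cons, List.count_cons]
          rw [← h2, ← h1]
          simp
        · have h2le : 2 ≤ (b :: u).count x := (ih hs').mp ⟨p, hp, h1, h2⟩
          rw [List.count_cons (b := a)]
          omega
      · intro hc
        by_cases hax : a = x
        · have hcnt : 1 ≤ (b :: u).count x := by
            rw [List.count_cons (b := a)] at hc
            split at hc <;> omega
          have hmem : x ∈ b :: u := List.count_pos_iff.mp (by omega)
          have hbx : b = x := by
            rcases List.mem_cons.mp hmem with h | h
            · exact h.symm
            · exact le_antisymm (hbu x h) (hax ▸ hab)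
          exact ⟨(a, b), by simp, hax.trans hbx.symm, hbx⟩
        · have hc' : 2 ≤ (b :: u).count x := by
            rw [List.count_cons (b := a)] at hc
            have : (a == x) = false := by simp [hax]
            rw [this] at hc
            simpa using hc
          rcases (ih hs').mpr hc' with ⟨p, hp, h1, h2⟩
          exact ⟨p, List.mem_cons_of_mem _ (by simpa using hp), h1, h2⟩

-- B's emission loop equals A's reduced loop, given matching predicates and the
-- invariant "the emitted set holds exactly the output's elements"
theorem emit_foldl_eq (l : List Int) (P Q : Int → Bool) (r : List Int) (e : PySem.Set Int)
    (hPQ : ∀ x ∈ l, P x = Q x)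
    (he : ∀ x : Int, x ∈ e ↔ x ∈ r) :
    (l.foldl
      (fun (acc : List Int × PySem.Set Int) x =>
        if Q x && !(PySem.Set.contains acc.2 x)
        then (acc.1 ++ [x], PySem.Set.add acc.2 x) else acc) (r, e)).1
    = l.foldl (fun acc x => if P x && !(acc.any (fun y => y == x)) then acc ++ [x] else acc) r := by
  induction l generalizing r e with
  | nil => simp
  | cons x t ih =>
    simp only [List.foldl_cons]
    have hxc : PySem.Set.contains e x = r.any (fun y => y == x) := by
      rw [Bool.eq_iff_iff]
      simp only [PySem.Set.contains, List.contains_iff_mem, List.any_eq_true, beq_iff_eq]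
      constructor
      · intro h; exact ⟨x, (he x).mp h, rfl⟩
      · rintro ⟨y, hy, rfl⟩; exact (he y).mpr hy
    have hc : (Q x && !(PySem.Set.contains e x)) = (P x && !(r.any (fun y => y == x))) := by
      rw [← hPQ x (by simp), hxc]
    by_cases hcond : (P x && !(r.any (fun y => y == x))) = true
    · rw [if_pos (by rw [hc]; exact hcond), if_pos hcond]
      exact ih (r ++ [x]) (PySem.Set.add e x)
        (fun y hy => hPQ y (by simp [hy]))
        (fun y => by rw [PySem.Set.mem_add]; simp [he y])
    · rw [if_neg (by rw [hc]; exact hcond), if_neg hcond]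
      exact ih r e (fun y hy => hPQ y (by simp [hy])) he

-- A reduces to one canonical fold over the list values
theorem removeDuplicatas_eq_canon (l : List Int) :
    removeDuplicatas l =
    l.foldl (fun acc x =>
      if decide (2 ≤ l.count x) && !(acc.any (fun y => y == x)) then acc ++ [x] else acc) [] := by
  unfold removeDuplicatas
  rw [PySem.List.foldl_congr_mem _ _
    (fun acc i =>
      if decide (2 ≤ l.count (PySem.List.pyGetD l i 0)) &&
         !(acc.any (fun y => y == PySem.List.pyGetD l i 0))
      then acc ++ [PySem.List.pyGetD l i 0] else acc) []
    (by
      intro acc i hi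
      rw [PySem.List.mem_pyRange_one] at hi
      have hd := duplicado_iff l i hi.1 hi.2
      have hdb : ((PySem.List.pyRange 0 l.length 1).foldl
          (fun d j =>
            if (PySem.List.pyGetD l i 0 == PySem.List.pyGetD l j 0) && (i != j)
            then true else d) false)
          = decide (2 ≤ l.count (PySem.List.pyGetD l i 0)) := by
        rw [Bool.eq_iff_iff, hd, decide_eq_true_iff]
      simp only [hdb, possuiValor_eq_any])]
  exact PySem.List.foldl_pyRange_zero_pyGetD' l 0
    (fun acc x => if decide (2 ≤ l.count x) && !(acc.any (fun y => y == x)) then acc ++ [x] else acc) []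

-- B reduces to the same canonical fold
theorem removeDuplicatas_alt_eq_canon (l : List Int) :
    removeDuplicatas_alt l =
    l.foldl (fun acc x =>
      if decide (2 ≤ l.count x) && !(acc.any (fun y => y == x)) then acc ++ [x] else acc) [] := by
  unfold removeDuplicatas_alt
  have hsort : (PySem.List.sorted l (fun x => x) false).Pairwise (· ≤ ·) :=
    PySem.List.sorted_pairwise l (fun x => x)
  have hperm : (PySem.List.sorted l (fun x => x) false).Perm l :=
    PySem.List.sorted_perm l (fun x => x) false
  have hdups : ∀ x : Int, PySem.Set.contains
      (((PySem.List.sorted l (fun x => x) false).zip (PySem.List.sorted l (fun x => x) false).tail).foldl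
        (fun d p => if p.1 == p.2 then PySem.Set.add d p.2 else d) PySem.Set.empty) x
      = decide (2 ≤ l.count x) := by
    intro x
    rw [Bool.eq_iff_iff]
    simp only [PySem.Set.contains, List.contains_iff_mem, decide_eq_true_iff]
    rw [mem_dups_foldl, ← hperm.count_eq x,
        ← adj_pair_iff_two_le_count _ hsort x]
    simp [PySem.Set.empty]
  rw [emit_foldl_eq l (fun x => decide (2 ≤ l.count x)) _ [] PySem.Set.empty
      (fun x _ => (hdups x).symm) (fun x => by simp [PySem.Set.empty])]

-- ===== VERDICT (by name: the statement is the Claim_ definition above) =====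
theorem removeDuplicatas_spec : Claim_equal_removeDuplicatas := by
  intro lista _
  unfold Spec_removeDuplicatas
  rw [removeDuplicatas_eq_canon, removeDuplicatas_alt_eq_canon]
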